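-- pv_equiv track=rewrite | github.com/rae-men/sling | merge_preview.py | dedupe_injected_runtime_script
-- ===== SOURCE A (Python) =====
-- def dedupe_injected_runtime_script(html: str) -> str:
--     """Remove previously injected runtime IIFE blocks (keeps one fresh insertion)."""
--     out = []
--     i = 0
--     n = len(html)
--     while i < n:
--         s = html.find("<script>", i)
--         if s < 0:
--             out.append(html[i:])
--             break
--         out.append(html[i:s])
--         e = html.find("</script>", s)
--         if e < 0:
--             out.append(html[s:])
--             break
--         block = html[s : e + len("</script>")]
--         if ("window.switchTab = switchTab;" in block) and ('var ytModal = root.querySelector("#ytModal");' in block):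
--             i = e + len("</script>")
--             continue
--         out.append(block)
--         i = e + len("</script>")
--     return "".join(out)
-- ===== SOURCE B (Python) =====
-- MARK1 = "window.switchTab = switchTab;"
-- MARK2 = 'var ytModal = root.querySelector("#ytModal");'
-- CLOSE = "</script>"
--
--
-- def _render_segment(part: str) -> str:
--     """A segment that ended with '</script>' in the original: drop it if it is
--     an injected runtime block, otherwise restore it verbatim."""
--     j = part.find("<script>")
--     if j >= 0:
--         block = part[j:] + CLOSE
--         if MARK1 in block and MARK2 in block:
--             return part[:j]
--     return part + CLOSE
--
--
-- def dedupe_injected_runtime_script(html: str) -> str: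
--     parts = html.split(CLOSE)
--     return "".join(_render_segment(p) for p in parts[:-1]) + parts[-1]
-- ===== Notes on version B (the rewrite author's own statement) =====
-- stated objective: simpler
-- what changed: A walks a cursor through the string, repeatedly locating the next script open tag and its matching close tag and slicing around them; B splits the whole string on the close tag once and re-renders each segment independently (dropping a segment's block when it is an injected runtime block), so the cursor arithmetic disappears.
import Mathlib
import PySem

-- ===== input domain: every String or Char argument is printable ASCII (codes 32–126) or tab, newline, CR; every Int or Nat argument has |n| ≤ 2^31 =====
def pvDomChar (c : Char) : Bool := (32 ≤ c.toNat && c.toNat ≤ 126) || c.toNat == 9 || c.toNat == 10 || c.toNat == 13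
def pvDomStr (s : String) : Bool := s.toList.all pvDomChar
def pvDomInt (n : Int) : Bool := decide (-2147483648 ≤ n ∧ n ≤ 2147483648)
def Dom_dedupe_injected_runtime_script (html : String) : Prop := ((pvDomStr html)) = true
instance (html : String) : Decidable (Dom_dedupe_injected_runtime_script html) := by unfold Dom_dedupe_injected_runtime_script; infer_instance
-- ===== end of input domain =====

-- B replaces A's manual cursor loop (paired tag searches plus slice bookkeeping) by splitting the
-- whole string on the closing script tag once and re-rendering each segment (objective: simpler).

-- ===== PORT A =====
-- A's while-loop over the cursor i, ported as recursion on the remaining suffix t = html[i:]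
-- (html.find(sub, i) = i + find of the suffix; the emitted pieces are the same strings).
def pvA_loop (t : List Char) : List Char :=
  if _h0 : t = [] then []                                   -- while i < n
  else
    let s := PySem.Chars.find t "<script>".toList           -- s = html.find("<script>", i) - i
    if _hs : s < 0 then t                                   -- out.append(html[i:]); break
    else
      let pre := t.take s.toNat                             -- out.append(html[i:s])
      let rest := t.drop s.toNat                            -- html[s:]
      let e := PySem.Chars.find rest "</script>".toList     -- e = html.find("</script>", s) - s
      if _he : e < 0 then pre ++ rest                       -- out.append(html[s:]); break
      else
        let block := rest.take (e.toNat + 9)                -- html[s : e + len("</script>")]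
        pre ++
          (if PySem.Chars.isIn "window.switchTab = switchTab;".toList block &&
              PySem.Chars.isIn "var ytModal = root.querySelector(\"#ytModal\");".toList block then
            pvA_loop (rest.drop (e.toNat + 9))              -- continue (block dropped)
          else
            block ++ pvA_loop (rest.drop (e.toNat + 9)))    -- out.append(block)
termination_by t.length
decreasing_by
  all_goals
    simp only [List.length_drop]
    have : 0 < t.length := List.length_pos_iff.mpr _h0
    omega

def dedupe_injected_runtime_script (html : String) : String :=
  String.mk (pvA_loop html.toList)

-- ===== PORT B =====
def pvM1 : List Char := "window.switchTab = switchTab;".toList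
def pvM2 : List Char := "var ytModal = root.querySelector(\"#ytModal\");".toList
def pvClose : List Char := "</script>".toList
def pvOpen : List Char := "<script>".toList

-- _render_segment(part)
def pvRenderSegment (part : List Char) : List Char :=
  let j := PySem.Chars.find part pvOpen
  if 0 ≤ j then
    let block := part.drop j.toNat ++ pvClose
    if PySem.Chars.isIn pvM1 block && PySem.Chars.isIn pvM2 block then part.take j.toNat
    else part ++ pvClose
  else part ++ pvClose

-- "".join(_render_segment(p) for p in parts[:-1]) + parts[-1]
def pvJoin (parts : List (List Char)) : List Char :=
  (parts.dropLast.map pvRenderSegment).flatten ++ (parts.getLast?.getD [])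

def dedupe_injected_runtime_script_alt (html : String) : String :=
  String.mk (pvJoin (PySem.Chars.splitOn html.toList pvClose))

-- ===== PRECONDITION & SPEC =====
def Spec_dedupe_injected_runtime_script (html : String) (out : String) : Prop := out = dedupe_injected_runtime_script_alt html
instance (html : String) (out : String) : Decidable (Spec_dedupe_injected_runtime_script html out) := by unfold Spec_dedupe_injected_runtime_script; infer_instance

-- ===== CLAIM (what is proved, stated in full; the proofs are below) =====
def Claim_equal_dedupe_injected_runtime_script : Prop := ∀ (html : String), Dom_dedupe_injected_runtime_script html → Spec_dedupe_injected_runtime_script html (dedupe_injected_runtime_script html)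

-- ===== LEMMAS AND PROOFS =====

def pvSpl (t : List Char) : List (List Char) :=
  if _he : PySem.Chars.find t pvClose < 0 then [t]
  else t.take (PySem.Chars.find t pvClose).toNat ::
       pvSpl (t.drop ((PySem.Chars.find t pvClose).toNat + 9))
termination_by t.length
decreasing_by
  have ht : t ≠ [] := by intro h; subst h; revert _he; decide
  have : 0 < t.length := List.length_pos_iff.mpr ht
  simp only [List.length_drop]; omega

theorem pv_find_go_shift (sub : List Char) (hsub : sub ≠ []) (l : List Char) (k : Nat) :
    PySem.Chars.find.go sub l k =
      if PySem.Chars.find l sub = -1 then -1 else (k : Int) + PySem.Chars.find l sub := by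
  induction l generalizing k with
  | nil => simp [PySem.Chars.find, PySem.Chars.find.go, List.isEmpty_iff, hsub]
  | cons c rest ih =>
    rw [PySem.Chars.find.go]
    rw [show PySem.Chars.find (c :: rest) sub = PySem.Chars.find.go sub (c :: rest) 0 from rfl]
    rw [PySem.Chars.find.go]
    by_cases hp : sub.isPrefixOf (c :: rest)
    · simp [hp]
    · simp only [hp, Bool.false_eq_true, if_false]
      rw [ih, ih]
      have hge := PySem.Chars.neg_one_le_find rest sub
      by_cases hf : PySem.Chars.find rest sub = -1
      · simp [hf]
      · have h1 : ¬ (1 + PySem.Chars.find rest sub = -1) := by omega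
        simp only [hf, if_false]
        push_cast
        rw [if_neg h1]
        ring

theorem pv_find_cons (sub : List Char) (hsub : sub ≠ []) (c : Char) (rest : List Char) :
    PySem.Chars.find (c :: rest) sub =
      if sub.isPrefixOf (c :: rest) then 0
      else if PySem.Chars.find rest sub = -1 then -1 else PySem.Chars.find rest sub + 1 := by
  rw [show PySem.Chars.find (c :: rest) sub = PySem.Chars.find.go sub (c :: rest) 0 from rfl]
  rw [PySem.Chars.find.go]
  by_cases hp : sub.isPrefixOf (c :: rest)
  · simp [hp]
  · simp only [hp, Bool.false_eq_true, if_false]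
    rw [pv_find_go_shift sub hsub]
    split
    · rfl
    · push_cast; ring

theorem pv_cons_headI_tail {α : Type} [Inhabited α] (l : List α) (h : l ≠ []) :
    l.headI :: l.tail = l := by
  cases l with
  | nil => exact absurd rfl h
  | cons a l => simp

theorem pvSpl_ne_nil (t : List Char) : pvSpl t ≠ [] := by
  rw [pvSpl]; split <;> simp

theorem pv_go_spec : ∀ (fuel : Nat) (t cur : List Char) (acc : List (List Char)), t.length < fuel →
    PySem.Chars.splitOn.go pvClose fuel t cur acc
      = acc.reverse ++ (cur.reverse ++ (pvSpl t).headI) :: (pvSpl t).tail := by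
  intro fuel
  induction fuel with
  | zero => intro t cur acc h; omega
  | succ fuel ih =>
    intro t cur acc h
    match t with
    | [] =>
      rw [PySem.Chars.splitOn.go]
      · rw [show pvSpl [] = [[]] by rw [pvSpl]; rw [dif_pos (by decide)]]
        simp
      · omega
    | c :: rest =>
      rw [PySem.Chars.splitOn.go]
      by_cases hp : pvClose.isPrefixOf (c :: rest)
      · rw [if_pos hp]
        rw [ih _ _ _ (by simp [pvClose] at h ⊢; omega)]
        have hf : PySem.Chars.find (c :: rest) pvClose = 0 := by
          rw [pv_find_cons _ (by decide), if_pos hp]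
        rw [show pvSpl (c :: rest)
              = [] :: pvSpl ((c :: rest).drop 9) by
            rw [pvSpl]; rw [dif_neg (by rw [hf]; omega)]; simp [hf]]
        have hnn := pvSpl_ne_nil ((c :: rest).drop 9)
        simp [pvClose]
        simp at hnn
        exact pv_cons_headI_tail _ hnn
      · rw [if_neg hp]
        rw [ih _ _ _ (by simp at h ⊢; omega)]
        have hfc := pv_find_cons pvClose (by decide) c rest
        rw [if_neg hp] at hfc
        have hge := PySem.Chars.neg_one_le_find rest pvClose
        by_cases hf : PySem.Chars.find rest pvClose = -1
        · rw [hf, if_pos rfl] at hfc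
          rw [show pvSpl (c :: rest) = [c :: rest] by
            rw [pvSpl]; rw [dif_pos (by rw [hfc]; omega)]]
          rw [show pvSpl rest = [rest] by
            rw [pvSpl]; rw [dif_pos (by rw [hf]; omega)]]
          simp
        · rw [if_neg hf] at hfc
          have hge0 : 0 ≤ PySem.Chars.find rest pvClose := by omega
          have htn : (PySem.Chars.find rest pvClose + 1).toNat
              = (PySem.Chars.find rest pvClose).toNat + 1 := by omega
          rw [show pvSpl (c :: rest)
                = (c :: rest.take (PySem.Chars.find rest pvClose).toNat)
                  :: pvSpl (rest.drop ((PySem.Chars.find rest pvClose).toNat + 9)) by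
            rw [pvSpl]; rw [dif_neg (by rw [hfc]; omega)]
            rw [hfc, htn]
            simp [List.take_succ_cons, List.drop_succ_cons]]
          rw [show pvSpl rest
                = rest.take (PySem.Chars.find rest pvClose).toNat
                  :: pvSpl (rest.drop ((PySem.Chars.find rest pvClose).toNat + 9)) by
            rw [pvSpl]; rw [dif_neg (by omega)]]
          simp

theorem pv_splitOn_eq_pvSpl (t : List Char) : PySem.Chars.splitOn t pvClose = pvSpl t := by
  rw [show PySem.Chars.splitOn t pvClose = PySem.Chars.splitOn.go pvClose (t.length + 1) t [] [] from rfl]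
  rw [pv_go_spec _ _ _ _ (by omega)]
  simp
  exact pv_cons_headI_tail _ (pvSpl_ne_nil t)

-- sub occurs first at k  →  find = k
theorem pv_first_occ (t sub : List Char) (_hsub : sub ≠ []) (k : Nat)
    (h1 : sub <+: t.drop k) (h2 : ∀ i, i < k → ¬ sub <+: t.drop i) :
    PySem.Chars.find t sub = (k : Int) := by
  have hinf : sub <:+: t := ((h1.isInfix).trans (List.drop_suffix k t).isInfix)
  have hge : 0 ≤ PySem.Chars.find t sub := (PySem.Chars.find_nonneg_iff t sub).mpr hinf
  obtain ⟨hpre, hmin⟩ := PySem.Chars.find_spec (s := t) (sub := sub) hge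
  rcases Nat.lt_trichotomy (PySem.Chars.find t sub).toNat k with h | h | h
  · exact absurd hpre (h2 _ h)
  · omega
  · exact absurd h1 (hmin _ h)

-- an infix of t.take k is a prefix of some t.drop j with j < k
theorem pv_infix_take (sub t : List Char) (hsub : sub ≠ []) (k : Nat)
    (h : sub <:+: t.take k) : ∃ j, j < k ∧ sub <+: t.drop j := by
  obtain ⟨l, r, hlr⟩ := h
  refine ⟨l.length, ?_, ?_⟩
  · by_contra hk
    push_neg at hk
    have : (t.take k).drop l.length = [] := by
      rw [List.drop_eq_nil_iff]
      simp; omega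
    rw [← hlr] at this
    simp at this
    exact hsub this.1
  · have hp : sub <+: (t.take k).drop l.length := by
      rw [← hlr]; simp
    calc sub <+: (t.take k).drop l.length := hp
      _ = (t.drop l.length).take (k - l.length) := by rw [List.drop_take]
      _ <+: t.drop l.length := List.take_prefix _ _


theorem pv_ov1 : ∀ d : Fin 9, 0 < d.val → ¬ (pvClose.drop d.val <+: pvOpen) := by decide

theorem pv_ov2 : ∀ d : Fin 8, ¬ (pvOpen.drop d.val <+: pvClose) := by decide

-- a "</script>" strictly before a "<script>" ends before it starts
theorem pv_sep_CO (t : List Char) (e s : Nat)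
    (hC : pvClose <+: t.drop e) (hO : pvOpen <+: t.drop s) (h : e < s) : e + 9 ≤ s := by
  by_contra hk
  push_neg at hk
  obtain ⟨u, hu⟩ := hC
  have hd : t.drop s = pvClose.drop (s - e) ++ u := by
    have hdd : t.drop s = (t.drop e).drop (s - e) := by rw [List.drop_drop]; congr 1; omega
    rw [hdd, ← hu, List.drop_append_of_le_length (by simp [pvClose]; omega)]
  have hpre : pvClose.drop (s - e) <+: pvOpen := by
    apply List.prefix_of_prefix_length_le (List.prefix_append _ _) (hd ▸ hO)
    simp [pvClose, pvOpen]; omega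
  exact pv_ov1 ⟨s - e, by omega⟩ (by simp; omega) hpre

-- a "<script>" at s forces any "</script>" at e₂ ≥ s to start at least 8 later
theorem pv_sep_OC (t : List Char) (s e2 : Nat)
    (hO : pvOpen <+: t.drop s) (hC : pvClose <+: t.drop e2) (h : s ≤ e2) : s + 8 ≤ e2 := by
  by_contra hk
  push_neg at hk
  obtain ⟨v, hv⟩ := hO
  have hd : t.drop e2 = pvOpen.drop (e2 - s) ++ v := by
    have hdd : t.drop e2 = (t.drop s).drop (e2 - s) := by rw [List.drop_drop]; congr 1; omega
    rw [hdd, ← hv, List.drop_append_of_le_length (by simp [pvOpen]; omega)]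
  have hpre : pvOpen.drop (e2 - s) <+: pvClose := by
    apply List.prefix_of_prefix_length_le (List.prefix_append _ _) (hd ▸ hC)
    simp [pvClose, pvOpen]; omega
  exact pv_ov2 ⟨e2 - s, by omega⟩ hpre

-- decomposition of t at a "</script>" occurrence
theorem pv_decomp (t : List Char) (k : Nat) (h : pvClose <+: t.drop k) :
    t = t.take k ++ pvClose ++ t.drop (k + 9) := by
  obtain ⟨u, hu⟩ := h
  have hu9 : u = t.drop (k + 9) := by
    have hdd : (t.drop k).drop 9 = u := by rw [← hu]; simp [pvClose]
    rw [← hdd, List.drop_drop]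
  calc t = t.take k ++ t.drop k := (List.take_append_drop k t).symm
    _ = t.take k ++ pvClose ++ t.drop (k + 9) := by rw [← hu, hu9, List.append_assoc]


-- step lemmas for B's composition G t := pvJoin (pvSpl t)
theorem pvG_neg (t : List Char) (h : PySem.Chars.find t pvClose < 0) :
    pvJoin (pvSpl t) = t := by
  rw [pvSpl, dif_pos h]; simp [pvJoin]

theorem pvG_pos (t : List Char) (h : ¬ PySem.Chars.find t pvClose < 0) :
    pvJoin (pvSpl t) = pvRenderSegment (t.take (PySem.Chars.find t pvClose).toNat)
      ++ pvJoin (pvSpl (t.drop ((PySem.Chars.find t pvClose).toNat + 9))) := by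
  rw [pvSpl, dif_neg h]
  obtain ⟨p, ps, hps⟩ := List.exists_cons_of_ne_nil
    (pvSpl_ne_nil (t.drop ((PySem.Chars.find t pvClose).toNat + 9)))
  rw [hps]
  simp [pvJoin]

theorem pvRender_noOpen (part : List Char) (h : PySem.Chars.find part pvOpen = -1) :
    pvRenderSegment part = part ++ pvClose := by
  unfold pvRenderSegment
  rw [h]
  norm_num

-- B leaves a string with no "<script>" unchanged
theorem pvB_id1 (t : List Char) : ¬ pvOpen <:+: t → pvJoin (pvSpl t) = t := by
  induction t using pvSpl.induct with
  | case1 t he => intro _; exact pvG_neg t he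
  | case2 t he ih =>
    intro h
    have hge : 0 ≤ PySem.Chars.find t pvClose := by omega
    obtain ⟨hC, _⟩ := PySem.Chars.find_spec hge
    have hnO : PySem.Chars.find (t.take (PySem.Chars.find t pvClose).toNat) pvOpen = -1 := by
      rw [PySem.Chars.find_eq_neg_one_iff]
      intro hin
      obtain ⟨j, _, hpre⟩ := pv_infix_take _ _ (by decide) _ hin
      exact h ((hpre.isInfix).trans (List.drop_suffix j t).isInfix)
    have htail : ¬ pvOpen <:+: t.drop ((PySem.Chars.find t pvClose).toNat + 9) :=
      fun hin => h (hin.trans (List.drop_suffix _ t).isInfix)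
    rw [pvG_pos t he, pvRender_noOpen _ hnO, ih htail]
    exact (pv_decomp t _ hC).symm

-- B leaves a string with no "</script>" after the first "<script>" unchanged
theorem pvB_id2 (t : List Char) : ∀ (s : Nat), PySem.Chars.find t pvOpen = (s : Int) →
    ¬ pvClose <:+: t.drop s → pvJoin (pvSpl t) = t := by
  induction t using pvSpl.induct with
  | case1 t he => intro s _ _; exact pvG_neg t he
  | case2 t he ih =>
    intro s hfO hnC
    have hge : 0 ≤ PySem.Chars.find t pvClose := by omega
    obtain ⟨hC, hCmin⟩ := PySem.Chars.find_spec hge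
    have hgeO : 0 ≤ PySem.Chars.find t pvOpen := by rw [hfO]; omega
    obtain ⟨hO, hOmin⟩ := PySem.Chars.find_spec hgeO
    rw [hfO] at hO hOmin
    simp only [Int.toNat_natCast] at hO hOmin
    have hes : (PySem.Chars.find t pvClose).toNat < s := by
      by_contra hk
      push_neg at hk
      apply hnC
      have hdd : pvClose <+: (t.drop s).drop ((PySem.Chars.find t pvClose).toNat - s) := by
        rw [List.drop_drop, show s + ((PySem.Chars.find t pvClose).toNat - s)
              = (PySem.Chars.find t pvClose).toNat from by omega]
        exact hC
      exact (hdd.isInfix).trans (List.drop_suffix _ _).isInfix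
    have hsep : (PySem.Chars.find t pvClose).toNat + 9 ≤ s := pv_sep_CO t _ s hC hO hes
    have hnO : PySem.Chars.find (t.take (PySem.Chars.find t pvClose).toNat) pvOpen = -1 := by
      rw [PySem.Chars.find_eq_neg_one_iff]
      intro hin
      obtain ⟨j, hj, hpre⟩ := pv_infix_take _ _ (by decide) _ hin
      exact hOmin j (by omega) hpre
    have h1 : PySem.Chars.find (t.drop ((PySem.Chars.find t pvClose).toNat + 9)) pvOpen
        = ((s - ((PySem.Chars.find t pvClose).toNat + 9) : Nat) : Int) := by
      apply pv_first_occ _ _ (by decide)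
      · rw [List.drop_drop, show (PySem.Chars.find t pvClose).toNat + 9
            + (s - ((PySem.Chars.find t pvClose).toNat + 9)) = s from by omega]
        exact hO
      · intro i hi
        rw [List.drop_drop]
        exact hOmin _ (by omega)
    have h2 : ¬ pvClose <:+:
        (t.drop ((PySem.Chars.find t pvClose).toNat + 9)).drop (s - ((PySem.Chars.find t pvClose).toNat + 9)) := by
      rw [List.drop_drop, show (PySem.Chars.find t pvClose).toNat + 9
            + (s - ((PySem.Chars.find t pvClose).toNat + 9)) = s from by omega]
      exact hnC
    rw [pvG_pos t he, pvRender_noOpen _ hnO, ih _ h1 h2]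
    exact (pv_decomp t _ hC).symm

-- B's behaviour across one <script>…</script> block of A
-- t.take s through a "</script>" occurrence at e, e + 9 ≤ s
theorem pv_take_mid (t : List Char) (e s : Nat) (hC : pvClose <+: t.drop e) (h : e + 9 ≤ s) :
    t.take s = t.take e ++ pvClose ++ (t.drop (e + 9)).take (s - (e + 9)) := by
  have he : e < t.length := by
    have := hC.length_le
    have h2 := List.length_drop (l := t) (i := e)
    by_contra hk
    push_neg at hk
    have : t.drop e = [] := List.drop_eq_nil_of_le hk
    rw [this] at hC
    have := hC.length_le
    simp [pvClose] at this
  have hlen : (t.take e ++ pvClose).length = e + 9 := by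
    simp [pvClose]; omega
  have hkey := List.take_length_add_append (l₁ := t.take e ++ pvClose)
    (l₂ := t.drop (e + 9)) (s - (e + 9))
  rw [hlen, show e + 9 + (s - (e + 9)) = s from by omega] at hkey
  calc t.take s = ((t.take e ++ pvClose) ++ t.drop (e + 9)).take s := by
        conv_lhs => rw [pv_decomp t e hC]
    _ = t.take e ++ pvClose ++ (t.drop (e + 9)).take (s - (e + 9)) := hkey

theorem pvB_step (t : List Char) : ∀ (s e' : Nat),
    PySem.Chars.find t pvOpen = (s : Int) →
    PySem.Chars.find (t.drop s) pvClose = (e' : Int) →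
    pvJoin (pvSpl t) = t.take s ++
      (if PySem.Chars.isIn pvM1 ((t.drop s).take (e' + 9)) &&
          PySem.Chars.isIn pvM2 ((t.drop s).take (e' + 9)) then []
       else (t.drop s).take (e' + 9)) ++
      pvJoin (pvSpl (t.drop (s + (e' + 9)))) := by
  induction t using pvSpl.induct with
  | case1 t he =>
    intro s e' hfO hfC
    exfalso
    have hge : 0 ≤ PySem.Chars.find (t.drop s) pvClose := by rw [hfC]; omega
    obtain ⟨hC, -⟩ := PySem.Chars.find_spec hge
    have : 0 ≤ PySem.Chars.find t pvClose :=
      (PySem.Chars.find_nonneg_iff _ _).mpr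
        (((hC.isInfix).trans (List.drop_suffix _ _).isInfix).trans (List.drop_suffix s t).isInfix)
    omega
  | case2 t he ih =>
    intro s e' hfO hfC
    have hge : 0 ≤ PySem.Chars.find t pvClose := by omega
    obtain ⟨hC, hCmin⟩ := PySem.Chars.find_spec hge
    have hgeO : 0 ≤ PySem.Chars.find t pvOpen := by rw [hfO]; omega
    obtain ⟨hO, hOmin⟩ := PySem.Chars.find_spec hgeO
    rw [hfO] at hO hOmin
    simp only [Int.toNat_natCast] at hO hOmin
    have hgeC' : 0 ≤ PySem.Chars.find (t.drop s) pvClose := by rw [hfC]; omega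
    obtain ⟨hC'0, hC'min⟩ := PySem.Chars.find_spec hgeC'
    rw [hfC] at hC'0 hC'min
    simp only [Int.toNat_natCast] at hC'0 hC'min
    have hC' : pvClose <+: t.drop (s + e') := by rw [← List.drop_drop]; exact hC'0
    by_cases hcase : (PySem.Chars.find t pvClose).toNat < s
    · -- the first "</script>" of t lies inside the plain prefix before the "<script>"
      have hsep : (PySem.Chars.find t pvClose).toNat + 9 ≤ s := pv_sep_CO t _ s hC hO hcase
      have hnO : PySem.Chars.find (t.take (PySem.Chars.find t pvClose).toNat) pvOpen = -1 := by
        rw [PySem.Chars.find_eq_neg_one_iff]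
        intro hin
        obtain ⟨j, hj, hpre⟩ := pv_infix_take _ _ (by decide) _ hin
        exact hOmin j (by omega) hpre
      have h1 : PySem.Chars.find (t.drop ((PySem.Chars.find t pvClose).toNat + 9)) pvOpen
          = ((s - ((PySem.Chars.find t pvClose).toNat + 9) : Nat) : Int) := by
        apply pv_first_occ _ _ (by decide)
        · rw [List.drop_drop, show (PySem.Chars.find t pvClose).toNat + 9
              + (s - ((PySem.Chars.find t pvClose).toNat + 9)) = s from by omega]
          exact hO
        · intro i hi
          rw [List.drop_drop]
          exact hOmin _ (by omega)
      have h2 : PySem.Chars.find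
          ((t.drop ((PySem.Chars.find t pvClose).toNat + 9)).drop (s - ((PySem.Chars.find t pvClose).toNat + 9)))
          pvClose = (e' : Int) := by
        rw [List.drop_drop, show (PySem.Chars.find t pvClose).toNat + 9
              + (s - ((PySem.Chars.find t pvClose).toNat + 9)) = s from by omega]
        exact hfC
      rw [pvG_pos t he, pvRender_noOpen _ hnO, ih _ _ h1 h2]
      rw [List.drop_drop, show (PySem.Chars.find t pvClose).toNat + 9
            + (s - ((PySem.Chars.find t pvClose).toNat + 9)) = s from by omega]
      rw [List.drop_drop, show (PySem.Chars.find t pvClose).toNat + 9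
            + (s - ((PySem.Chars.find t pvClose).toNat + 9) + (e' + 9)) = s + (e' + 9) from by omega]
      rw [pv_take_mid t _ s hC hsep]
      simp only [List.append_assoc]
    · -- the first "</script>" of t is the one closing the block: it sits at s + e'
      push_neg at hcase
      have he1 : (PySem.Chars.find t pvClose).toNat = s + e' := by
        have hA : e' ≤ (PySem.Chars.find t pvClose).toNat - s := by
          by_contra hk
          push_neg at hk
          apply hC'min ((PySem.Chars.find t pvClose).toNat - s) (by omega)
          rw [List.drop_drop, show s + ((PySem.Chars.find t pvClose).toNat - s)
                = (PySem.Chars.find t pvClose).toNat from by omega]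
          exact hC
        have hB : (PySem.Chars.find t pvClose).toNat ≤ s + e' := by
          by_contra hk
          push_neg at hk
          exact hCmin (s + e') (by omega) hC'
        omega
      have he8 : 8 ≤ e' := by
        have := pv_sep_OC t s (s + e') hO hC' (by omega)
        omega
      have hfT : PySem.Chars.find (t.take (s + e')) pvOpen = (s : Int) := by
        apply pv_first_occ _ _ (by decide)
        · rw [List.drop_take]
          exact List.prefix_take_iff.mpr ⟨hO, by simp [pvOpen]; omega⟩
        · intro i hi hpre
          rw [List.drop_take] at hpre
          exact hOmin i hi (hpre.trans (List.take_prefix _ _))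
      have hBA : (t.take (s + e')).drop s ++ pvClose = (t.drop s).take (e' + 9) := by
        rw [List.drop_take, show s + e' - s = e' from by omega]
        rw [List.take_add]
        obtain ⟨u, hu⟩ := hC'0
        rw [← hu, show (9 : Nat) = pvClose.length from by simp [pvClose], List.take_left]
      rw [pvG_pos t he, he1]
      unfold pvRenderSegment
      rw [hfT]
      simp only [Int.toNat_natCast, Int.natCast_nonneg, if_pos, hBA]
      rw [show t.drop (s + e' + 9) = t.drop (s + (e' + 9)) from by rw [Nat.add_assoc]]
      by_cases hm : (PySem.Chars.isIn pvM1 ((t.drop s).take (e' + 9)) &&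
          PySem.Chars.isIn pvM2 ((t.drop s).take (e' + 9))) = true
      · rw [if_pos hm, if_pos hm]
        rw [List.take_take, show min s (s + e') = s from by omega]
        simp
      · rw [if_neg hm, if_neg hm]
        have hkey : t.take (s + e') ++ pvClose = t.take s ++ (t.drop s).take (e' + 9) := by
          rw [List.take_add, List.append_assoc]
          congr 1
          rw [← hBA, List.drop_take, show s + e' - s = e' from by omega]
        rw [hkey]

theorem pv_main (t : List Char) : pvA_loop t = pvJoin (pvSpl t) := by
  induction t using pvA_loop.induct with
  | case1 =>
    rw [pvA_loop, dif_pos rfl, pvG_neg [] (by decide)]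
  | case2 t hne s hs =>
    have hs' : PySem.Chars.find t pvOpen < 0 := hs
    rw [pvA_loop]
    simp only [show "<script>".toList = pvOpen from rfl,
      show "</script>".toList = pvClose from rfl]
    rw [dif_neg hne, dif_pos hs']
    have h1 : PySem.Chars.find t pvOpen = -1 := by
      have := PySem.Chars.neg_one_le_find t pvOpen
      omega
    exact (pvB_id1 t ((PySem.Chars.find_eq_neg_one_iff t pvOpen).mp h1)).symm
  | case3 t hne s hs rest e he =>
    have hs' : ¬ PySem.Chars.find t pvOpen < 0 := hs
    have he' : PySem.Chars.find (t.drop (PySem.Chars.find t pvOpen).toNat) pvClose < 0 := he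
    rw [pvA_loop]
    simp only [show "<script>".toList = pvOpen from rfl,
      show "</script>".toList = pvClose from rfl]
    rw [dif_neg hne, dif_neg hs', dif_pos he', List.take_append_drop]
    have hfO : PySem.Chars.find t pvOpen = ((PySem.Chars.find t pvOpen).toNat : Int) := by omega
    have h1 : PySem.Chars.find (t.drop (PySem.Chars.find t pvOpen).toNat) pvClose = -1 := by
      have := PySem.Chars.neg_one_le_find (t.drop (PySem.Chars.find t pvOpen).toNat) pvClose
      omega
    exact (pvB_id2 t _ hfO ((PySem.Chars.find_eq_neg_one_iff _ pvClose).mp h1)).symm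
  | case4 t hne s hs rest e he ih =>
    have hs' : ¬ PySem.Chars.find t pvOpen < 0 := hs
    have he' : ¬ PySem.Chars.find (t.drop (PySem.Chars.find t pvOpen).toNat) pvClose < 0 := he
    have ih' : pvA_loop ((t.drop (PySem.Chars.find t pvOpen).toNat).drop
          ((PySem.Chars.find (t.drop (PySem.Chars.find t pvOpen).toNat) pvClose).toNat + 9))
        = pvJoin (pvSpl ((t.drop (PySem.Chars.find t pvOpen).toNat).drop
          ((PySem.Chars.find (t.drop (PySem.Chars.find t pvOpen).toNat) pvClose).toNat + 9))) := ih
    rw [pvA_loop]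
    simp only [show "<script>".toList = pvOpen from rfl,
      show "</script>".toList = pvClose from rfl,
      show "window.switchTab = switchTab;".toList = pvM1 from rfl,
      show "var ytModal = root.querySelector(\"#ytModal\");".toList = pvM2 from rfl]
    rw [dif_neg hne, dif_neg hs', dif_neg he']
    have hfO : PySem.Chars.find t pvOpen
        = (((PySem.Chars.find t pvOpen).toNat : Nat) : Int) := by omega
    have hfC : PySem.Chars.find (t.drop (PySem.Chars.find t pvOpen).toNat) pvClose
        = (((PySem.Chars.find (t.drop (PySem.Chars.find t pvOpen).toNat) pvClose).toNat : Nat) : Int) := by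
      omega
    rw [pvB_step t _ _ hfO hfC, ih']
    rw [show ((t.drop (PySem.Chars.find t pvOpen).toNat).drop
          ((PySem.Chars.find (t.drop (PySem.Chars.find t pvOpen).toNat) pvClose).toNat + 9))
        = t.drop ((PySem.Chars.find t pvOpen).toNat
            + ((PySem.Chars.find (t.drop (PySem.Chars.find t pvOpen).toNat) pvClose).toNat + 9)) from
      List.drop_drop]
    by_cases hm : (PySem.Chars.isIn pvM1
          ((t.drop (PySem.Chars.find t pvOpen).toNat).take
            ((PySem.Chars.find (t.drop (PySem.Chars.find t pvOpen).toNat) pvClose).toNat + 9)) &&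
        PySem.Chars.isIn pvM2
          ((t.drop (PySem.Chars.find t pvOpen).toNat).take
            ((PySem.Chars.find (t.drop (PySem.Chars.find t pvOpen).toNat) pvClose).toNat + 9))) = true
    · rw [if_pos hm, if_pos hm]
      simp
    · rw [if_neg hm, if_neg hm]
      simp [List.append_assoc]

-- ===== VERDICT (by name: the statement is the Claim_ definition above) =====
theorem dedupe_injected_runtime_script_spec : Claim_equal_dedupe_injected_runtime_script := by
  intro html _hdom
  unfold Spec_dedupe_injected_runtime_script
  unfold dedupe_injected_runtime_script dedupe_injected_runtime_script_alt
  rw [pv_splitOn_eq_pvSpl, pv_main]
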